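-- pv_equiv track=rewrite | github.com/sinclair-29/graduation_project | temporal_clustering.py | brutally_split
-- ===== SOURCE A (Python) =====
-- def brutally_split(totlen):
--     result = [0 for _ in range(totlen)]
--     for i in range(26):
--         start_index = i * (totlen // 26)  # 起始索引
--         end_index = (i + 1) * (totlen // 26)  # 结束索引（不包含）
--         for k in range(start_index, end_index):
--             result[k] = i  # 赋值为字母的 ASCII 码
--         if i == 25:
--             for k in range(end_index, totlen):
--                 result[k] = i
--     return result
-- ===== SOURCE B (Python) =====
-- def brutally_split(totlen):
--     block = totlen // 26
--     if block == 0: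
--         return [25] * totlen
--     return [min(k // block, 25) for k in range(totlen)]
-- ===== Notes on version B (the rewrite author's own statement) =====
-- stated objective: simpler
-- what changed: Replaces the nested 26-block fill loops (plus the i==25 tail loop) over a pre-allocated zero list with a single closed-form per-index label min(k // block, 25), guarded by block == 0 for short inputs.
import Mathlib
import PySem

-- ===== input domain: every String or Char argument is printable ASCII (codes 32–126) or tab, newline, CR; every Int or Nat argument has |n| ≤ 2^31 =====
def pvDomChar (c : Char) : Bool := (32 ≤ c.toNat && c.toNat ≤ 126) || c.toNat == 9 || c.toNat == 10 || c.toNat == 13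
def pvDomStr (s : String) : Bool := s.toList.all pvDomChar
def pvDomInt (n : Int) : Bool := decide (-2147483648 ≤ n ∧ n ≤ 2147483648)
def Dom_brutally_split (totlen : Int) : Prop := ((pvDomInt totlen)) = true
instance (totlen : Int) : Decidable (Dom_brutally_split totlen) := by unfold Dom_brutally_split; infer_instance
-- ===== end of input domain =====

-- B computes each label by the closed formula min(k // block, 25) in one comprehension instead of
-- filling 26 blocks plus a tail with nested loops; objective: simpler. Return-value equivalence only.

-- ===== PORT A =====
-- inner loop 'for k in range(s, e): result[k] = v'
def pvFill (v s e : Int) (r : List Int) : List Int :=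
  (PySem.List.pyRange s e 1).foldl (fun r k => PySem.List.pySetD r k v) r

-- body of 'for i in range(26)'
def pvStep (totlen : Int) (r : List Int) (i : Int) : List Int :=
  let startIndex := i * (PySem.Int.floordiv totlen 26)
  let endIndex := (i + 1) * (PySem.Int.floordiv totlen 26)
  let r := pvFill i startIndex endIndex r
  if i == 25 then pvFill i endIndex totlen r else r

def brutally_split (totlen : Int) : List Int :=
  (PySem.List.pyRange 0 26 1).foldl (pvStep totlen)
    ((PySem.List.pyRange 0 totlen 1).map (fun _ => 0))

-- ===== PORT B =====
def brutally_split_alt (totlen : Int) : List Int :=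
  let block := PySem.Int.floordiv totlen 26
  if block = 0 then List.replicate totlen.toNat 25
  else (PySem.List.pyRange 0 totlen 1).map (fun k => min (PySem.Int.floordiv k block) 25)

-- ===== PRECONDITION & SPEC =====
-- Pre_ excludes exactly the negative lengths not divisible by 26, on which A raises IndexError
-- (the tail loop assigns at negative indices reaching before the front of the empty result list);
-- B returns [] there.
def Pre_brutally_split (totlen : Int) : Prop := 0 ≤ totlen ∨ (26:Int) ∣ totlen
instance (totlen : Int) : Decidable (Pre_brutally_split totlen) := by unfold Pre_brutally_split; infer_instance
def pvWitness_brutally_split : Int := (30)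

def Spec_brutally_split (totlen : Int) (out : List Int) : Prop := out = brutally_split_alt totlen
instance (totlen : Int) (out : List Int) : Decidable (Spec_brutally_split totlen out) := by unfold Spec_brutally_split; infer_instance

-- ===== CLAIM (what is proved, stated in full; the proofs are below) =====
def Claim_equal_brutally_split : Prop := ∀ (totlen : Int), Dom_brutally_split totlen → Pre_brutally_split totlen → Spec_brutally_split totlen (brutally_split totlen)
-- ===== LEMMAS AND PROOFS =====

lemma pvFill_nil_range (v s e : Int) (r : List Int) (h : e ≤ s) : pvFill v s e r = r := by
  unfold pvFill; rw [PySem.List.pyRange_one_eq_nil h]; rfl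

lemma pvFill_cons (v s e : Int) (r : List Int) (h : s < e) :
    pvFill v s e r = pvFill v (s+1) e (PySem.List.pySetD r s v) := by
  unfold pvFill; rw [PySem.List.pyRange_one_cons h]; rfl

lemma length_pvFill (v s e : Int) (r : List Int) : (pvFill v s e r).length = r.length := by
  unfold pvFill
  induction PySem.List.pyRange s e 1 generalizing r with
  | nil => rfl
  | cons k l ih => simp [ih, PySem.List.length_pySetD]

lemma getElem?_pvFill (v : Int) (e : Int) : ∀ (n : Nat) (s : Int) (r : List Int) (j : Nat),
    (e - s).toNat = n → 0 ≤ s → j < r.length →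
    (pvFill v s e r)[j]? = if s ≤ (j:Int) ∧ (j:Int) < e then some v else r[j]? := by
  intro n
  induction n with
  | zero =>
    intro s r j hn hs hj
    rw [pvFill_nil_range v s e r (by omega)]
    rw [if_neg (by omega)]
  | succ n ih =>
    intro s r j hn hs hj
    have hlt : s < e := by omega
    rw [pvFill_cons v s e r hlt]
    rw [ih (s+1) (PySem.List.pySetD r s v) j (by omega) (by omega)
          (by rw [PySem.List.length_pySetD]; exact hj)]
    rw [PySem.List.pySetD_of_nonneg r v hs]
    by_cases hje : (j:Int) = s
    · have hjs : j = s.toNat := by omega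
      rw [if_neg (by omega), if_pos (by omega)]
      subst hjs
      simp [hj]
    · rw [List.getElem?_set]
      by_cases h1 : s + 1 ≤ (j:Int) ∧ (j:Int) < e
      · rw [if_pos h1, if_pos (by omega)]
      · rw [if_neg h1]
        by_cases h2 : s ≤ (j:Int) ∧ (j:Int) < e
        · omega
        · rw [if_neg h2, if_neg (by omega)]

lemma pySetD_nil (k v : Int) : PySem.List.pySetD ([] : List Int) k v = [] := by
  simp only [PySem.List.pySetD, PySem.List.pySet?, PySem.List.pyIdx?]
  split_ifs <;> simp

lemma pvFill_nil (v s e : Int) : pvFill v s e [] = [] := by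
  unfold pvFill
  induction PySem.List.pyRange s e 1 with
  | nil => rfl
  | cons k l ih => rw [List.foldl_cons, pySetD_nil]; exact ih

lemma pvStep_nil (t i : Int) : pvStep t [] i = [] := by
  unfold pvStep
  simp [pvFill_nil]

lemma length_pvStep (t : Int) (r : List Int) (i : Int) : (pvStep t r i).length = r.length := by
  unfold pvStep
  split <;> simp [length_pvFill]

lemma length_foldl_pvStep (t : Int) (l : List Int) (r : List Int) :
    (l.foldl (pvStep t) r).length = r.length := by
  induction l generalizing r with
  | nil => rfl
  | cons i l ih => simp [List.foldl, ih, length_pvStep]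

lemma foldl_pvStep_nil (t : Int) (l : List Int) : l.foldl (pvStep t) [] = [] := by
  induction l with
  | nil => rfl
  | cons i l ih => simpa [pvStep_nil] using ih

-- the partial outer loop, proofs only
def pvOuter (totlen : Int) (m : Nat) : List Int :=
  (PySem.List.pyRange 0 (m:Int) 1).foldl (pvStep totlen)
    ((PySem.List.pyRange 0 totlen 1).map (fun _ => 0))

lemma pvOuter_succ (totlen : Int) (m : Nat) :
    pvOuter totlen (m+1) = pvStep totlen (pvOuter totlen m) (m:Int) := by
  unfold pvOuter
  rw [show ((m+1:Nat):Int) = (m:Int) + 1 by push_cast; ring,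
      PySem.List.pyRange_one_succ_right (by omega), List.foldl_append]
  rfl

lemma length_pvOuter (totlen : Int) (_ht : 0 ≤ totlen) (m : Nat) :
    (pvOuter totlen m).length = totlen.toNat := by
  unfold pvOuter
  rw [length_foldl_pvStep]
  simp [PySem.List.length_pyRange_one]

lemma b_nonneg (totlen : Int) (ht : 0 ≤ totlen) : 0 ≤ PySem.Int.floordiv totlen 26 := by
  have h := PySem.Int.floordiv_mul_add_mod totlen 26
  have h1 := PySem.Int.mod_nonneg totlen (b := 26) (by omega)
  have h2 := PySem.Int.mod_lt totlen (b := 26) (by omega)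
  nlinarith

lemma pvOuter_getElem? (totlen : Int) (ht : 0 ≤ totlen) (m : Nat) (hm : m ≤ 25)
    (j : Nat) (hj : j < totlen.toNat) :
    (pvOuter totlen m)[j]? =
      some (if (j:Int) < (m:Int) * PySem.Int.floordiv totlen 26
            then PySem.Int.floordiv (j:Int) (PySem.Int.floordiv totlen 26) else 0) := by
  have hb := b_nonneg totlen ht
  induction m with
  | zero =>
    rw [show pvOuter totlen 0 = (PySem.List.pyRange 0 totlen 1).map (fun _ => (0:Int)) from by
      unfold pvOuter
      rw [PySem.List.pyRange_one_eq_nil (a := 0) (b := ((0:Nat):Int)) (by omega)]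
      rfl]
    rw [List.getElem?_map, PySem.List.getElem?_pyRange_one, if_pos (by omega),
        if_neg (by norm_num)]
    rfl
  | succ m ih =>
    have hm' : m ≤ 25 := by omega
    rw [pvOuter_succ]
    rw [show pvStep totlen (pvOuter totlen m) (m:Int) =
          pvFill (m:Int) ((m:Int) * PySem.Int.floordiv totlen 26)
            (((m:Int)+1) * PySem.Int.floordiv totlen 26) (pvOuter totlen m) from by
      unfold pvStep
      rw [if_neg (by simp; omega)]]
    rw [getElem?_pvFill (m:Int) (((m:Int)+1) * PySem.Int.floordiv totlen 26)
          ((((m:Int)+1) * PySem.Int.floordiv totlen 26 - (m:Int) * PySem.Int.floordiv totlen 26).toNat)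
          ((m:Int) * PySem.Int.floordiv totlen 26) (pvOuter totlen m) j rfl
          (by positivity) (by rw [length_pvOuter totlen ht]; omega)]
    rw [ih hm']
    set b := PySem.Int.floordiv totlen 26 with hbdef
    by_cases hw : (m:Int) * b ≤ (j:Int) ∧ (j:Int) < ((m:Int)+1) * b
    · have hbpos : 0 < b := by nlinarith [hw.1, hw.2]
      rw [if_pos hw, if_pos (by push_cast; omega)]
      have : PySem.Int.floordiv (j:Int) b = (m:Int) :=
        (PySem.Int.floordiv_eq_iff_of_pos hbpos).mpr ⟨hw.1, hw.2⟩
      rw [this]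
    · rw [if_neg hw]
      congr 1
      by_cases h2 : (j:Int) < (m:Int) * b
      · rw [if_pos h2, if_pos (by push_cast; nlinarith)]
      · rw [if_neg h2, if_neg (by push_cast; omega)]

lemma brutally_split_getElem? (totlen : Int) (ht : 0 ≤ totlen) (j : Nat) (hj : j < totlen.toNat) :
    (brutally_split totlen)[j]? =
      some (if PySem.Int.floordiv totlen 26 = 0 then 25
            else min (PySem.Int.floordiv (j:Int) (PySem.Int.floordiv totlen 26)) 25) := by
  have hb := b_nonneg totlen ht
  have hjt : (j:Int) < totlen := by omega
  have h26b : 26 * PySem.Int.floordiv totlen 26 ≤ totlen := by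
    have h := PySem.Int.floordiv_mul_add_mod totlen 26
    have h1 := PySem.Int.mod_nonneg totlen (b := 26) (by omega)
    omega
  set b := PySem.Int.floordiv totlen 26 with hbdef
  have hstep : brutally_split totlen =
      pvFill ((25:Nat):Int) ((((25:Nat):Int) + 1) * b) totlen
        (pvFill ((25:Nat):Int) (((25:Nat):Int) * b) ((((25:Nat):Int) + 1) * b)
          (pvOuter totlen 25)) := by
    rw [show brutally_split totlen = pvOuter totlen (25+1) from rfl, pvOuter_succ]
    simp only [pvStep]
    rw [if_pos (by decide)]
  rw [show (((25:Nat):Int)) = (25:Int) from rfl,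
      show ((25:Int) + 1) * b = 26 * b from by ring] at hstep
  rw [hstep]
  rw [getElem?_pvFill 25 totlen ((totlen - 26 * b).toNat) (26 * b)
        (pvFill 25 (25 * b) (26 * b) (pvOuter totlen 25)) j rfl (by positivity)
        (by rw [length_pvFill, length_pvOuter totlen ht]; omega)]
  rw [getElem?_pvFill 25 (26 * b) ((26 * b - 25 * b).toNat) (25 * b)
        (pvOuter totlen 25) j rfl (by positivity)
        (by rw [length_pvOuter totlen ht]; omega)]
  rw [pvOuter_getElem? totlen ht 25 (by omega) j hj]
  rw [show (((25:Nat):Int)) = (25:Int) from rfl]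
  by_cases hb0 : b = 0
  · rw [if_pos hb0]
    rw [if_pos (by constructor <;> omega)]
  · have hbpos : 0 < b := by omega
    rw [if_neg hb0]
    have hr1 : ((25:Int) + 1) * b = 26 * b := by ring
    by_cases hc1 : 26 * b ≤ (j:Int)
    · rw [if_pos ⟨hc1, hjt⟩]
      have h25 : (25:Int) ≤ PySem.Int.floordiv (j:Int) b := by
        have := (PySem.Int.le_floordiv_iff_mul_le (a := (j:Int)) (q := 26) hbpos).mpr hc1
        omega
      rw [min_eq_right h25]
    · rw [if_neg (by omega)]
      by_cases hc2 : 25 * b ≤ (j:Int)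
      · rw [if_pos ⟨hc2, by omega⟩]
        have : PySem.Int.floordiv (j:Int) b = 25 :=
          (PySem.Int.floordiv_eq_iff_of_pos hbpos).mpr ⟨hc2, by omega⟩
        rw [this]
        norm_num
      · have h3 : PySem.Int.floordiv (j:Int) b < 25 :=
          (PySem.Int.floordiv_lt_iff_lt_mul hbpos).mpr (by omega)
        rw [if_neg (by omega), if_pos (by omega), min_eq_left (by omega)]

lemma length_brutally_split (totlen : Int) (ht : 0 ≤ totlen) :
    (brutally_split totlen).length = totlen.toNat := by
  have : brutally_split totlen = pvOuter totlen 26 := rfl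
  rw [this, length_pvOuter totlen ht]

lemma length_brutally_split_alt (totlen : Int) (_ht : 0 ≤ totlen) :
    (brutally_split_alt totlen).length = totlen.toNat := by
  simp only [brutally_split_alt]
  split <;> simp [PySem.List.length_pyRange_one]

lemma brutally_split_alt_getElem? (totlen : Int) (ht : 0 ≤ totlen) (j : Nat) (hj : j < totlen.toNat) :
    (brutally_split_alt totlen)[j]? =
      some (if PySem.Int.floordiv totlen 26 = 0 then 25
            else min (PySem.Int.floordiv (j:Int) (PySem.Int.floordiv totlen 26)) 25) := by
  simp only [brutally_split_alt]
  by_cases hb0 : PySem.Int.floordiv totlen 26 = 0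
  · rw [if_pos hb0, if_pos hb0, List.getElem?_replicate, if_pos hj]
  · rw [if_neg hb0, if_neg hb0, List.getElem?_map, PySem.List.getElem?_pyRange_one,
        if_pos (by omega)]
    simp

-- ===== VERDICT (by name: the statement is the Claim_ definition above) =====
theorem brutally_split_spec : Claim_equal_brutally_split := by
  intro totlen hdom hpre
  unfold Spec_brutally_split
  by_cases ht : 0 ≤ totlen
  · apply List.ext_getElem?
    intro j
    by_cases hj : j < totlen.toNat
    · rw [brutally_split_getElem? totlen ht j hj, brutally_split_alt_getElem? totlen ht j hj]
    · rw [List.getElem?_eq_none (by rw [length_brutally_split totlen ht]; omega),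
          List.getElem?_eq_none (by rw [length_brutally_split_alt totlen ht]; omega)]
  · -- totlen < 0: both sides are []
    have hA : brutally_split totlen = [] := by
      unfold brutally_split
      rw [PySem.List.pyRange_one_eq_nil (a := 0) (b := totlen) (by omega)]
      simp [foldl_pvStep_nil]
    have hb : PySem.Int.floordiv totlen 26 < 0 := by
      have h := PySem.Int.floordiv_mul_add_mod totlen 26
      have h1 := PySem.Int.mod_nonneg totlen (b := 26) (by omega)
      have h2 := PySem.Int.mod_lt totlen (b := 26) (by omega)
      nlinarith
    have hB : brutally_split_alt totlen = [] := by
      unfold brutally_split_alt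
      rw [if_neg (by omega)]
      rw [PySem.List.pyRange_one_eq_nil (a := 0) (b := totlen) (by omega)]
      rfl
    rw [hA, hB]
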